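-- pv_equiv track=rewrite | github.com/Teffa14/AutoPTU | scripts/build_pokemon_move_sources.py | _inherit_egg_moves
-- ===== SOURCE A (Python) =====
-- def _inherit_egg_moves(
--     dex: int,
--     by_dex_direct: dict[int, set[str]],
--     parent_map: dict[int, int | None],
--     cache: dict[int, set[str]],
-- ) -> set[str]:
--     if dex in cache:
--         return cache[dex]
--     moves = set(by_dex_direct.get(dex, set()))
--     parent_dex = parent_map.get(dex)
--     if parent_dex:
--         moves.update(_inherit_egg_moves(parent_dex, by_dex_direct, parent_map, cache))
--     cache[dex] = moves
--     return moves
-- ===== SOURCE B (Python) =====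
-- def _inherit_egg_moves(
--     dex: int,
--     by_dex_direct: dict[int, set[str]],
--     parent_map: dict[int, int | None],
--     cache: dict[int, set[str]],
-- ) -> set[str]:
--     # Iterative two-phase rewrite of the recursion.
--     # Phase 1: walk up the parent chain, collecting the uncached nodes.
--     path = []
--     cur = dex
--     while cur not in cache:
--         path.append(cur)
--         parent = parent_map.get(cur)
--         if not parent:
--             break
--         cur = parent
--     # Phase 2: from the topmost collected ancestor down to dex, accumulate
--     # moves and fill the cache exactly as the recursion would.
--     acc = cache.get(cur, set())
--     for node in reversed(path):
--         acc = set(by_dex_direct.get(node, set())) | acc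
--         cache[node] = acc
--     return acc
-- ===== Notes on version B (the rewrite author's own statement) =====
-- stated objective: alternative
-- what changed: Replaced the self-recursive memoised descent with an iterative two-phase walk: first collect the uncached parent chain, then fold the move sets back down from the topmost ancestor, filling the cache on the way.
import Mathlib
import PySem

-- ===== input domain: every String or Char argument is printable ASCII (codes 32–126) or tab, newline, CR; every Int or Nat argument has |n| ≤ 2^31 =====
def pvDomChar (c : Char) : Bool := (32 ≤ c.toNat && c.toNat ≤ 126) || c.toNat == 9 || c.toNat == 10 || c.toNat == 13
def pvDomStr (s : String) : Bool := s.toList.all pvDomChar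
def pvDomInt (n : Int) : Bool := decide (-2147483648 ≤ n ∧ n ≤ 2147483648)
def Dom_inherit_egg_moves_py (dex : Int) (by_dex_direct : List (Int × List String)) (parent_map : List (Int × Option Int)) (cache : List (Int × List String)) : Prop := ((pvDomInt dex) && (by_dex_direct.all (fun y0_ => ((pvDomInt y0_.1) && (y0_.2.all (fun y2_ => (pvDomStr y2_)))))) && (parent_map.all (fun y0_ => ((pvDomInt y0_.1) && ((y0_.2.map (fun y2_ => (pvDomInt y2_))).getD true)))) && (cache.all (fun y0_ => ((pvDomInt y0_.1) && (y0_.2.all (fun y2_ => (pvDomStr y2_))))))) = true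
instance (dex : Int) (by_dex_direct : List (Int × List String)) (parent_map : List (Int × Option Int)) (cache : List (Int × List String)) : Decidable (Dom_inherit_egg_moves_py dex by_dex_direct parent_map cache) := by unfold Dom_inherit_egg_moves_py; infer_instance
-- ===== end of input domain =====

-- B replaces the self-recursive memoised descent by an iterative two-phase walk (collect the
-- uncached parent chain, then fold the move sets back down); equivalence is about the RETURN
-- value only — both Pythons also write the same entries into the mutable `cache` argument.

-- dict.get k (first-match association-list lookup, shared by both ports)
def pvLookup {α : Type} (m : List (Int × α)) (k : Int) : Option α :=
  (m.find? (fun p => p.1 == k)).map (·.2)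

def pvLookupD {α : Type} (m : List (Int × α)) (k : Int) (d : α) : α :=
  (pvLookup m k).getD d

-- ===== PORT A =====
-- The recursion, fuelled (Python has no fuel; Pre_ guarantees the fuel |parent_map|+1 is never
-- exhausted).  The recursive call sees the same cache the Python callee does: in A all cache
-- writes happen only after the recursive call returns, so every lookup on the way up sees the
-- original cache, and the writes never influence the returned set.
def pvInheritRecA (bd : List (Int × List String)) (pm : List (Int × Option Int))
    (cache : List (Int × List String)) : Nat → Int → List String
  | 0, _ => []
  | f + 1, d =>
    match pvLookup cache d with
    | some v => v
    | none =>
      let moves := PySem.Set.ofList (pvLookupD bd d [])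
      match pvLookup pm d with
      | some (some p) =>
        if p ≠ 0 then PySem.Set.update moves (pvInheritRecA bd pm cache f p) else moves
      | _ => moves

def inherit_egg_moves_py (dex : Int) (by_dex_direct : List (Int × List String)) (parent_map : List (Int × Option Int)) (cache : List (Int × List String)) : List String :=
  pvInheritRecA by_dex_direct parent_map cache (parent_map.length + 1) dex

-- ===== PORT B =====
-- Phase 1: walk up via parent_map collecting the uncached nodes, returning (path, stop node).
def pvWalkB (pm : List (Int × Option Int)) (cache : List (Int × List String)) :
    Nat → Int → List Int → List Int × Int
  | 0, cur, path => (path, cur)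
  | f + 1, cur, path =>
    if (pvLookup cache cur).isSome then (path, cur)
    else
      match pvLookup pm cur with
      | some (some p) =>
        if p ≠ 0 then pvWalkB pm cache f p (path ++ [cur]) else (path ++ [cur], cur)
      | _ => (path ++ [cur], cur)

-- Phase 2: fold from the topmost collected ancestor down to dex (cache writes only affect the
-- mutable argument, not the returned set, so the port returns the accumulator).
def inherit_egg_moves_py_alt (dex : Int) (by_dex_direct : List (Int × List String)) (parent_map : List (Int × Option Int)) (cache : List (Int × List String)) : List String :=
  let w := pvWalkB parent_map cache (parent_map.length + 1) dex []
  w.1.reverse.foldl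
    (fun acc node => PySem.Set.union (PySem.Set.ofList (pvLookupD by_dex_direct node [])) acc)
    (pvLookupD cache w.2 [])

-- ===== PRECONDITION & SPEC =====
-- One edge of the parent graph: from an unstopped node, the next node of the chain, or none
-- if the node is cached or has no truthy parent (no recursion; just two lookups).
def pvParentStep (pm : List (Int × Option Int)) (cache : List (Int × List String))
    (s : Option Int) : Option Int :=
  match s with
  | none => none
  | some d =>
    if (pvLookup cache d).isSome then none
    else
      match pvLookup pm d with
      | some (some p) => if p ≠ 0 then some p else none
      | _ => none

-- Pre_: the parent chain from dex is exhausted after |parent_map|+1 edges, i.e. it reaches a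
-- cached or parentless node without cycling.  It excludes exactly the inputs whose chain
-- cycles, on which Python A recurses forever (RecursionError); a terminating chain visits
-- distinct keys of parent_map, hence always stops within |parent_map|+1 edges.
def Pre_inherit_egg_moves_py (dex : Int) (by_dex_direct : List (Int × List String)) (parent_map : List (Int × Option Int)) (cache : List (Int × List String)) : Prop :=
  (pvParentStep parent_map cache)^[parent_map.length + 1] (some dex) = none

instance (dex : Int) (by_dex_direct : List (Int × List String)) (parent_map : List (Int × Option Int)) (cache : List (Int × List String)) : Decidable (Pre_inherit_egg_moves_py dex by_dex_direct parent_map cache) := by unfold Pre_inherit_egg_moves_py; infer_instance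

def pvWitness_inherit_egg_moves_py : Int × (List (Int × List String)) × (List (Int × Option Int)) × (List (Int × List String)) :=
  (1, [(1, ["tackle"]), (2, ["growl"])], [(1, some 2)], [(3, ["pound"])])

def Spec_inherit_egg_moves_py (dex : Int) (by_dex_direct : List (Int × List String)) (parent_map : List (Int × Option Int)) (cache : List (Int × List String)) (out : List String) : Prop := out = inherit_egg_moves_py_alt dex by_dex_direct parent_map cache
instance (dex : Int) (by_dex_direct : List (Int × List String)) (parent_map : List (Int × Option Int)) (cache : List (Int × List String)) (out : List String) : Decidable (Spec_inherit_egg_moves_py dex by_dex_direct parent_map cache out) := by unfold Spec_inherit_egg_moves_py; infer_instance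

-- ===== CLAIM (what is proved, stated in full; the proofs are below) =====
def Claim_equal_inherit_egg_moves_py : Prop := ∀ (dex : Int) (by_dex_direct : List (Int × List String)) (parent_map : List (Int × Option Int)) (cache : List (Int × List String)), Dom_inherit_egg_moves_py dex by_dex_direct parent_map cache → Pre_inherit_egg_moves_py dex by_dex_direct parent_map cache → Spec_inherit_egg_moves_py dex by_dex_direct parent_map cache (inherit_egg_moves_py dex by_dex_direct parent_map cache)

-- ===== LEMMAS AND PROOFS =====

-- Fuelled form of the chain-termination condition, used only by the proofs.
def pvChainStops (pm : List (Int × Option Int)) (cache : List (Int × List String)) :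
    Nat → Int → Bool
  | 0, _ => false
  | f + 1, d =>
    if (pvLookup cache d).isSome then true
    else
      match pvLookup pm d with
      | some (some p) => if p ≠ 0 then pvChainStops pm cache f p else true
      | _ => true

lemma pvChainStops_of_iterate (pm : List (Int × Option Int)) (cache : List (Int × List String)) :
    ∀ (f : Nat) (d : Int), (pvParentStep pm cache)^[f] (some d) = none →
      pvChainStops pm cache f d = true := by
  intro f
  induction f with
  | zero => intro d h; simp at h
  | succ f ih =>
    intro d h
    rw [Function.iterate_succ_apply] at h
    simp only [pvChainStops]
    cases hc : pvLookup cache d with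
    | some v => simp
    | none =>
      simp only [pvParentStep, hc, Option.isSome_none, Bool.false_eq_true, if_false] at h ⊢
      cases hp : pvLookup pm d with
      | none => rfl
      | some o =>
        cases o with
        | none => simp [hp] at h ⊢
        | some p =>
          simp only [hp] at h ⊢
          by_cases hz : p ≠ 0
          · rw [if_pos hz] at h
            rw [if_pos hz]
            exact ih p h
          · rw [if_neg hz]

-- The common value of both programs on a stopping chain, as a direct recursion.
def pvChainVal (bd : List (Int × List String)) (pm : List (Int × Option Int))
    (cache : List (Int × List String)) : Nat → Int → List String
  | 0, d => pvLookupD cache d []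
  | f + 1, d =>
    match pvLookup cache d with
    | some v => v
    | none =>
      match pvLookup pm d with
      | some (some p) =>
        if p ≠ 0 then
          PySem.Set.update (PySem.Set.ofList (pvLookupD bd d [])) (pvChainVal bd pm cache f p)
        else PySem.Set.ofList (pvLookupD bd d [])
      | _ => PySem.Set.ofList (pvLookupD bd d [])

lemma pvRecA_eq_chainVal (bd : List (Int × List String)) (pm : List (Int × Option Int))
    (cache : List (Int × List String)) :
    ∀ (f : Nat) (d : Int), pvChainStops pm cache f d = true →
      pvInheritRecA bd pm cache f d = pvChainVal bd pm cache f d := by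
  intro f
  induction f with
  | zero => intro d h; simp [pvChainStops] at h
  | succ f ih =>
    intro d h
    simp only [pvChainStops] at h
    simp only [pvInheritRecA, pvChainVal]
    cases hc : pvLookup cache d with
    | some v => rfl
    | none =>
      simp only [hc, Option.isSome_none, Bool.false_eq_true, if_false] at h ⊢
      cases hp : pvLookup pm d with
      | none => rfl
      | some o =>
        cases o with
        | none => rfl
        | some p =>
          simp only [hp] at h ⊢
          by_cases hz : p ≠ 0
          · rw [if_pos hz] at h
            rw [if_pos hz, if_pos hz, ih p h]
          · rw [if_neg hz, if_neg hz]

lemma pvWalkB_fold_eq_chainVal (bd : List (Int × List String)) (pm : List (Int × Option Int))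
    (cache : List (Int × List String)) :
    ∀ (f : Nat) (d : Int) (path : List Int),
      (pvWalkB pm cache f d path).1.reverse.foldl
          (fun acc node =>
            PySem.Set.union (PySem.Set.ofList (pvLookupD bd node [])) acc)
          (pvLookupD cache (pvWalkB pm cache f d path).2 []) =
        path.reverse.foldl
          (fun acc node =>
            PySem.Set.union (PySem.Set.ofList (pvLookupD bd node [])) acc)
          (pvChainVal bd pm cache f d) := by
  intro f
  induction f with
  | zero => intro d path; rfl
  | succ f ih =>
    intro d path
    simp only [pvWalkB, pvChainVal]
    cases hc : pvLookup cache d with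
    | some v =>
      simp [hc, pvLookupD]
    | none =>
      simp only [Option.isSome_none, Bool.false_eq_true, if_false]
      cases hp : pvLookup pm d with
      | none =>
        simp [pvLookupD, hc, PySem.Set.union]
      | some o =>
        cases o with
        | none =>
          simp [pvLookupD, hc, PySem.Set.union]
        | some p =>
          dsimp only
          by_cases hz : p ≠ 0
          · rw [if_pos hz, if_pos hz]
            rw [ih p (path ++ [d])]
            simp [PySem.Set.union]
          · rw [if_neg hz, if_neg hz]
            simp [pvLookupD, hc, PySem.Set.union]

-- ===== VERDICT (by name: the statement is the Claim_ definition above) =====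
theorem inherit_egg_moves_py_spec : Claim_equal_inherit_egg_moves_py := by
  intro dex bd pm cache _ hpre
  have hstop := pvChainStops_of_iterate pm cache (pm.length + 1) dex hpre
  unfold Spec_inherit_egg_moves_py inherit_egg_moves_py inherit_egg_moves_py_alt
  rw [pvRecA_eq_chainVal bd pm cache _ dex hstop]
  have h := pvWalkB_fold_eq_chainVal bd pm cache (pm.length + 1) dex []
  simpa using h.symm
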